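-- pv_equiv track=rewrite | github.com/immeritos/leetcode-acm | stack/stack2.py | eliminate_game
-- ===== SOURCE A (Python) =====
-- def eliminate_game(arr):
--     stack = []
--
--     for num in arr:
--         stack.append(num)
--
--         if len(stack) >= 3 and stack[-1] == stack[-2] == stack[-3]:
--             stack.pop()
--             stack.pop()
--             stack.pop()
--
--     return stack
-- ===== SOURCE B (Python) =====
-- def eliminate_game(arr):
--     # run-length stack of [value, count]; a group is dropped as soon as it reaches 3
--     stack = []
--     for num in arr:
--         if stack and stack[-1][0] == num:
--             stack[-1][1] += 1
--             if stack[-1][1] == 3: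
--                 stack.pop()
--         else:
--             stack.append([num, 1])
--     out = []
--     for v, c in stack:
--         out.extend([v] * c)
--     return out
-- ===== Notes on version B (the rewrite author's own statement) =====
-- stated objective: alternative
-- what changed: Replaces the flat element stack (append then inspect/pop the last three raw elements) with a run-length stack of [value,count] pairs that pops a whole group when its count reaches 3, then expands the pairs back to a flat list once at the end.
import Mathlib
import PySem

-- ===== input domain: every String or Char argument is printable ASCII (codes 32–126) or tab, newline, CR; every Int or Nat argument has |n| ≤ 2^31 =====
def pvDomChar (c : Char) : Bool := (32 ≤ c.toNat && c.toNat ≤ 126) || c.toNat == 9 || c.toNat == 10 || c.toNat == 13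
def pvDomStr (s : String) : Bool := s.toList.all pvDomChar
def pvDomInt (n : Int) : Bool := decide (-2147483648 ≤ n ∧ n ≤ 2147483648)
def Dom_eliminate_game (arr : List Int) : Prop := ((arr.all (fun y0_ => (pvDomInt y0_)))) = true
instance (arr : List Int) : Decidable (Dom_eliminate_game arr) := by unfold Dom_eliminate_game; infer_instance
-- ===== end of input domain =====

-- B replaces the flat element stack with a run-length stack of (value,count) pairs,
-- popping a whole group when its count reaches 3 (alternative decomposition, same cost).


-- ===== PORT A =====
-- one iteration of A's loop: append num, then pop three times if the last three are equal
def egStep (stack : List Int) (num : Int) : List Int :=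
  let stack := stack ++ [num]
  if 3 ≤ stack.length ∧
      PySem.List.pyGet? stack (-1) = PySem.List.pyGet? stack (-2) ∧
      PySem.List.pyGet? stack (-2) = PySem.List.pyGet? stack (-3) then
    stack.dropLast.dropLast.dropLast
  else
    stack

def eliminate_game (arr : List Int) : List Int :=
  arr.foldl egStep []

-- ===== PORT B =====
-- one iteration of B's loop over the run-length stack (head = top of stack)
def egAltStep (stack : List (Int × Nat)) (num : Int) : List (Int × Nat) :=
  match stack with
  | (v, c) :: rest =>
      if v = num then
        if c + 1 = 3 then rest else (v, c + 1) :: rest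
      else
        (num, 1) :: (v, c) :: rest
  | [] => [(num, 1)]

def eliminate_game_alt (arr : List Int) : List Int :=
  ((arr.foldl egAltStep []).reverse).flatMap (fun p => List.replicate p.2 p.1)

-- ===== PRECONDITION & SPEC =====
def Spec_eliminate_game (arr : List Int) (out : List Int) : Prop := out = eliminate_game_alt arr
instance (arr : List Int) (out : List Int) : Decidable (Spec_eliminate_game arr out) := by unfold Spec_eliminate_game; infer_instance

-- ===== CLAIM (what is proved, stated in full; the proofs are below) =====
def Claim_equal_eliminate_game : Prop := ∀ (arr : List Int), Dom_eliminate_game arr → Spec_eliminate_game arr (eliminate_game arr)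

-- ===== LEMMAS AND PROOFS =====

-- flatten a run-length stack (head = top) into the reversed flat stack
def flattenRLE : List (Int × Nat) → List Int
  | [] => []
  | (v, c) :: r => List.replicate c v ++ flattenRLE r

-- adjacent groups carry distinct values
def DistinctAdj : List (Int × Nat) → Prop
  | (v, _) :: (w, d) :: r => v ≠ w ∧ DistinctAdj ((w, d) :: r)
  | _ => True

-- invariant of B's stack: every count is 1 or 2, adjacent groups have distinct values
def GoodRLE (t : List (Int × Nat)) : Prop :=
  (∀ p ∈ t, p.2 = 1 ∨ p.2 = 2) ∧ DistinctAdj t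

theorem egStep_short (xs : List Int) (n : Int) (h : xs.length ≤ 1) :
    egStep xs n = xs ++ [n] := by
  unfold egStep
  rw [if_neg]
  simp
  intro h2
  exact absurd h2 (by omega)

theorem egStep_long (r : List Int) (b c n : Int) :
    egStep (r.reverse ++ [c, b]) n =
      if n = b ∧ b = c then r.reverse else r.reverse ++ [c, b, n] := by
  unfold egStep
  have hl : (r.reverse ++ [c, b]) ++ [n] = r.reverse ++ [c, b, n] := by simp
  have h1 : PySem.List.pyGet? (r.reverse ++ [c, b, n]) (-1) = some n := by
    rw [PySem.List.pyGet?_neg_ofNat _ 1 (by omega) (by simp)]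
    simp
  have h2 : PySem.List.pyGet? (r.reverse ++ [c, b, n]) (-2) = some b := by
    rw [PySem.List.pyGet?_neg_ofNat _ 2 (by omega) (by simp)]
    simp
  have h3 : PySem.List.pyGet? (r.reverse ++ [c, b, n]) (-3) = some c := by
    rw [PySem.List.pyGet?_neg_ofNat _ 3 (by omega) (by simp)]
    simp
  simp only [hl, h1, h2, h3, List.length_append, List.length_reverse]
  by_cases hbc : n = b ∧ b = c
  · rw [if_pos, if_pos hbc]
    · simp
    · simp [hbc.1, hbc.2]
  · rw [if_neg, if_neg hbc]
    intro hcond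
    exact hbc ⟨by injection hcond.2.1, by injection hcond.2.2⟩

theorem flattenRLE_reverse (t : List (Int × Nat)) :
    (flattenRLE t).reverse = t.reverse.flatMap (fun p => List.replicate p.2 p.1) := by
  induction t with
  | nil => simp [flattenRLE]
  | cons p r ih => cases p; simp [flattenRLE, ih]

theorem step_sim (l : List Int) (t : List (Int × Nat)) (n : Int)
    (hg : GoodRLE t) (h : flattenRLE t = l.reverse) :
    GoodRLE (egAltStep t n) ∧ flattenRLE (egAltStep t n) = (egStep l n).reverse := by
  have hl : l = (flattenRLE t).reverse := by rw [h]; simp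
  subst hl
  obtain ⟨hc, hd⟩ := hg
  cases t with
  | nil =>
      refine ⟨⟨by simp [egAltStep], by simp [egAltStep, DistinctAdj]⟩, ?_⟩
      rw [show flattenRLE ([] : List (Int × Nat)) = [] from rfl]
      rw [egStep_short _ _ (by simp)]
      simp [egAltStep, flattenRLE]
  | cons p rest =>
      obtain ⟨v, c⟩ := p
      rcases hc (v, c) (by simp) with h1 | h2
      · -- c = 1
        subst h1
        cases rest with
        | nil =>
            have hst : egStep (flattenRLE [(v, 1)]).reverse n = [v, n] := by
              rw [egStep_short _ _ (by simp [flattenRLE])]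
              simp [flattenRLE]
            by_cases hvn : v = n
            · subst hvn
              refine ⟨⟨by simp [egAltStep], by simp [egAltStep, DistinctAdj]⟩, ?_⟩
              rw [hst]; simp [egAltStep, flattenRLE]
            · refine ⟨⟨?_, ?_⟩, ?_⟩
              · intro p hp; simp [egAltStep, hvn] at hp
                rcases hp with h | h <;> simp [h]
              · simp [egAltStep, hvn, DistinctAdj]
                exact fun h => hvn h.symm
              · rw [hst]; simp [egAltStep, hvn, flattenRLE]
        | cons q rest2 =>
            obtain ⟨w, d⟩ := q
            have hvw : v ≠ w := hd.1
            have hd' : DistinctAdj ((w, d) :: rest2) := hd.2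
            have hdpos : 1 ≤ d := by rcases hc (w, d) (by simp) with h | h <;> omega
            -- flattenRLE t = v :: w :: (replicate (d-1) w ++ flattenRLE rest2)
            have hfl : flattenRLE ((v, 1) :: (w, d) :: rest2)
                = v :: w :: (List.replicate (d - 1) w ++ flattenRLE rest2) := by
              simp [flattenRLE]
              rw [show d = 1 + (d - 1) by omega]
              simp [List.replicate_add]
            have hshape : (flattenRLE ((v, 1) :: (w, d) :: rest2)).reverse
                = (List.replicate (d - 1) w ++ flattenRLE rest2).reverse ++ [w, v] := by
              rw [hfl]; simp
            have hst := egStep_long (List.replicate (d - 1) w ++ flattenRLE rest2) v w n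
            rw [hshape, hst]
            by_cases hvn : v = n
            · subst hvn
              rw [if_neg (by rintro ⟨_, h⟩; exact hvw h)]
              refine ⟨⟨?_, ?_⟩, ?_⟩
              · intro p hp; simp [egAltStep] at hp
                rcases hp with h | h | h
                · simp [h]
                · rw [h]; exact hc (w, d) (by simp)
                · exact hc p (by simp [h])
              · simpa [egAltStep, DistinctAdj] using ⟨hvw, hd'⟩
              · have hrep : List.replicate d w = w :: List.replicate (d - 1) w := by
                  rw [show d = 1 + (d - 1) by omega]; simp [List.replicate_add]
                simp [egAltStep, flattenRLE, hrep]
            · rw [if_neg (by rintro ⟨h, _⟩; exact hvn h.symm)]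
              refine ⟨⟨?_, ?_⟩, ?_⟩
              · intro p hp; simp [egAltStep, hvn] at hp
                rcases hp with h | h | h | h
                · simp [h]
                · simp [h]
                · rw [h]; exact hc (w, d) (by simp)
                · exact hc p (by simp [h])
              · simp [egAltStep, hvn, DistinctAdj]
                exact ⟨fun h => hvn h.symm, hvw, hd'⟩
              · have hrep : List.replicate d w = w :: List.replicate (d - 1) w := by
                  rw [show d = 1 + (d - 1) by omega]; simp [List.replicate_add]
                simp [egAltStep, hvn, flattenRLE, hrep]
      · -- c = 2
        subst h2
        have hshape : (flattenRLE ((v, 2) :: rest)).reverse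
            = (flattenRLE rest).reverse ++ [v, v] := by
          simp [flattenRLE]
        have hst := egStep_long (flattenRLE rest) v v n
        rw [hshape, hst]
        have hdrest : DistinctAdj rest := by
          cases rest with
          | nil => trivial
          | cons q r2 => exact hd.2
        by_cases hvn : v = n
        · subst hvn
          rw [if_pos ⟨rfl, rfl⟩]
          refine ⟨⟨?_, ?_⟩, ?_⟩
          · intro p hp
            simp [egAltStep] at hp
            exact hc p (by simp [hp])
          · simpa [egAltStep] using hdrest
          · simp [egAltStep]
        · rw [if_neg (by rintro ⟨h, _⟩; exact hvn h.symm)]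
          refine ⟨⟨?_, ?_⟩, ?_⟩
          · intro p hp; simp [egAltStep, hvn] at hp
            rcases hp with h | h | h
            · simp [h]
            · simp [h]
            · exact hc p (by simp [h])
          · simp [egAltStep, hvn, DistinctAdj]
            exact ⟨fun h => hvn h.symm, hd⟩
          · simp [egAltStep, hvn, flattenRLE]

theorem fold_sim (arr : List Int) :
    ∀ (l : List Int) (t : List (Int × Nat)), GoodRLE t → flattenRLE t = l.reverse →
      flattenRLE (arr.foldl egAltStep t) = (arr.foldl egStep l).reverse := by
  induction arr with
  | nil => intro l t _ h; simpa using h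
  | cons n rest ih =>
      intro l t hg h
      obtain ⟨hg', h'⟩ := step_sim l t n hg h
      simpa using ih (egStep l n) (egAltStep t n) hg' h'

-- ===== VERDICT (by name: the statement is the Claim_ definition above) =====
theorem eliminate_game_spec : Claim_equal_eliminate_game := by
  intro arr _
  unfold Spec_eliminate_game eliminate_game eliminate_game_alt
  have h := fold_sim arr [] [] ⟨by simp, trivial⟩ (by simp [flattenRLE])
  rw [← flattenRLE_reverse, h, List.reverse_reverse]
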